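-- pv_equiv track=rewrite | github.com/SimeonChifligarov/Alpha_Judge_Softuni | Python_Basics/PB_Exams/Programming_Basics_Online_Example_Exam_7/04_Balls_v2.py | calculate_ball_points
-- ===== SOURCE A (Python) =====
-- def calculate_ball_points(colors):
--     points = 0
--     red_count = 0
--     orange_count = 0
--     yellow_count = 0
--     white_count = 0
--     black_divides = 0
--     other_colors = 0
--
--     for color in colors:
--         if color == 'red':
--             points += 5
--             red_count += 1
--         elif color == 'orange':
--             points += 10
--             orange_count += 1
--         elif color == 'yellow':
--             points += 15
--             yellow_count += 1
--         elif color == 'white':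
--             points += 20
--             white_count += 1
--         elif color == 'black':
--             points //= 2
--             black_divides += 1
--         else:
--             other_colors += 1
--
--     result = (
--         f'Total points: {points}',
--         f'Red balls: {red_count}',
--         f'Orange balls: {orange_count}',
--         f'Yellow balls: {yellow_count}',
--         f'White balls: {white_count}',
--         f'Other colors picked: {other_colors}',
--         f'Divides from black balls: {black_divides}',
--     )
--     return result
-- ===== SOURCE B (Python) =====
-- def calculate_ball_points(colors):
--     # Build the color table in one step, derive 'other' from the total,
--     # then a separate points-only pass preserving order.
--     red = colors.count('red')
--     orange = colors.count('orange')
--     yellow = colors.count('yellow')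
--     white = colors.count('white')
--     black = colors.count('black')
--     other = len(colors) - (red + orange + yellow + white + black)
--
--     points = 0
--     for color in colors:
--         if color == 'red':
--             points += 5
--         elif color == 'orange':
--             points += 10
--         elif color == 'yellow':
--             points += 15
--         elif color == 'white':
--             points += 20
--         elif color == 'black':
--             points //= 2
--
--     return (
--         f'Total points: {points}',
--         f'Red balls: {red}',
--         f'Orange balls: {orange}',
--         f'Yellow balls: {yellow}',
--         f'White balls: {white}',
--         f'Other colors picked: {other}',
--         f'Divides from black balls: {black}',
--     )
-- ===== Notes on version B (the rewrite author's own statement) =====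
-- stated objective: simpler
-- what changed: Replaces the single fused seven-counter accumulation loop with list.count calls for the five known colors, derives other_colors as len minus their sum, and keeps only a narrow order-preserving points-only pass.
import Mathlib
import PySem

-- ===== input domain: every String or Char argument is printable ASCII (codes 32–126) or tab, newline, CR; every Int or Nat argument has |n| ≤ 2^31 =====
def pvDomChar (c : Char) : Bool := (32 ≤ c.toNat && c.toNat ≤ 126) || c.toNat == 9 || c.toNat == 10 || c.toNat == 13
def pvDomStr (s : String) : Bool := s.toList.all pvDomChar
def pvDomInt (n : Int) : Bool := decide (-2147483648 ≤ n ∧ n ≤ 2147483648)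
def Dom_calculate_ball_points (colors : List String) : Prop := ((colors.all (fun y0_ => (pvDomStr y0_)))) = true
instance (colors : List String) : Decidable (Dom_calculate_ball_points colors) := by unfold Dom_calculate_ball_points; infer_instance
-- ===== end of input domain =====

-- B replaces A's fused seven-counter loop by per-color counts plus a points-only pass (objective: simpler).

-- ===== PORT A =====
-- state: (points, red_count, orange_count, yellow_count, white_count, black_divides, other_colors)
def pvStepA (s : Int × Int × Int × Int × Int × Int × Int) (color : String) :
    Int × Int × Int × Int × Int × Int × Int :=
  let (points, red, orange, yellow, white, black, other) := s
  if color = "red" then (points + 5, red + 1, orange, yellow, white, black, other)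
  else if color = "orange" then (points + 10, red, orange + 1, yellow, white, black, other)
  else if color = "yellow" then (points + 15, red, orange, yellow + 1, white, black, other)
  else if color = "white" then (points + 20, red, orange, yellow, white + 1, black, other)
  else if color = "black" then (PySem.Int.floordiv points 2, red, orange, yellow, white, black + 1, other)
  else (points, red, orange, yellow, white, black, other + 1)

def calculate_ball_points (colors : List String) :
    String × String × String × String × String × String × String :=
  let s := colors.foldl pvStepA (0, 0, 0, 0, 0, 0, 0)
  ("Total points: " ++ PySem.Int.toStr s.1,
   "Red balls: " ++ PySem.Int.toStr s.2.1,
   "Orange balls: " ++ PySem.Int.toStr s.2.2.1,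
   "Yellow balls: " ++ PySem.Int.toStr s.2.2.2.1,
   "White balls: " ++ PySem.Int.toStr s.2.2.2.2.1,
   "Other colors picked: " ++ PySem.Int.toStr s.2.2.2.2.2.2,
   "Divides from black balls: " ++ PySem.Int.toStr s.2.2.2.2.2.1)

-- ===== PORT B =====
def pvStepB (points : Int) (color : String) : Int :=
  if color = "red" then points + 5
  else if color = "orange" then points + 10
  else if color = "yellow" then points + 15
  else if color = "white" then points + 20
  else if color = "black" then PySem.Int.floordiv points 2
  else points

def calculate_ball_points_alt (colors : List String) :
    String × String × String × String × String × String × String :=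
  let red : Int := PySem.List.count colors "red"
  let orange : Int := PySem.List.count colors "orange"
  let yellow : Int := PySem.List.count colors "yellow"
  let white : Int := PySem.List.count colors "white"
  let black : Int := PySem.List.count colors "black"
  let other : Int := (colors.length : Int) - (red + orange + yellow + white + black)
  let points : Int := colors.foldl pvStepB 0
  ("Total points: " ++ PySem.Int.toStr points,
   "Red balls: " ++ PySem.Int.toStr red,
   "Orange balls: " ++ PySem.Int.toStr orange,
   "Yellow balls: " ++ PySem.Int.toStr yellow,
   "White balls: " ++ PySem.Int.toStr white,
   "Other colors picked: " ++ PySem.Int.toStr other,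
   "Divides from black balls: " ++ PySem.Int.toStr black)

-- ===== PRECONDITION & SPEC =====
def Spec_calculate_ball_points (colors : List String) (out : String × String × String × String × String × String × String) : Prop := out = calculate_ball_points_alt colors
instance (colors : List String) (out : String × String × String × String × String × String × String) : Decidable (Spec_calculate_ball_points colors out) := by unfold Spec_calculate_ball_points; infer_instance

-- ===== CLAIM (what is proved, stated in full; the proofs are below) =====
def Claim_equal_calculate_ball_points : Prop := ∀ (colors : List String), Dom_calculate_ball_points colors → Spec_calculate_ball_points colors (calculate_ball_points colors)

-- ===== LEMMAS AND PROOFS =====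

theorem foldA_eq (colors : List String) (s : Int × Int × Int × Int × Int × Int × Int) :
    colors.foldl pvStepA s =
      (colors.foldl pvStepB s.1,
       s.2.1 + colors.count "red",
       s.2.2.1 + colors.count "orange",
       s.2.2.2.1 + colors.count "yellow",
       s.2.2.2.2.1 + colors.count "white",
       s.2.2.2.2.2.1 + colors.count "black",
       s.2.2.2.2.2.2 + ((colors.length : Int)
         - ((colors.count "red" : Int) + colors.count "orange" + colors.count "yellow"
            + colors.count "white" + colors.count "black"))) := by
  induction colors generalizing s with
  | nil => simp
  | cons c cs ih =>
    obtain ⟨p, r, o, y, w, b, ot⟩ := s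
    by_cases h1 : c = "red"
    · simp [pvStepA, pvStepB, h1, ih]; omega
    by_cases h2 : c = "orange"
    · simp [pvStepA, pvStepB, h2, ih]; omega
    by_cases h3 : c = "yellow"
    · simp [pvStepA, pvStepB, h3, ih]; omega
    by_cases h4 : c = "white"
    · simp [pvStepA, pvStepB, h4, ih]; omega
    by_cases h5 : c = "black"
    · simp [pvStepA, pvStepB, h5, ih]; omega
    · simp [pvStepA, pvStepB, h1, h2, h3, h4, h5, ih]; omega

-- ===== VERDICT (by name: the statement is the Claim_ definition above) =====
theorem calculate_ball_points_spec : Claim_equal_calculate_ball_points := by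
  intro colors _
  unfold Spec_calculate_ball_points calculate_ball_points calculate_ball_points_alt
  simp [foldA_eq, PySem.List.count_eq]
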